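-- pv_equiv track=rewrite | github.com/iliiliiliili/variational-nn-pytorch | core.py | split_by_arrays
-- ===== SOURCE A (Python) =====
-- from typing import Callable, Dict, List, TypeVar, Union
--
-- T2 = TypeVar('T2')
--
-- def split_by_arrays(values: List[T2], counts: List[List[int]]):
--     result = []
--
--     i = 0
--
--     for local_counts in counts:
--         local_result = []
--         for count in local_counts:
--             local_result.append(values[i:i + count])
--             i += count
--         result.append(local_result)
--
--     return result
-- ===== SOURCE B (Python) =====
-- def split_by_arrays(values, counts):
--     # Pass 1: prefix-sum offset table over all counts, flattened.
--     flat = [c for lc in counts for c in lc]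
--     offsets = [0]
--     total = 0
--     for c in flat:
--         total += c
--         offsets.append(total)
--     # Pass 2: slice by consecutive offsets, grouped by the outer shape.
--     result = []
--     k = 0
--     for lc in counts:
--         result.append([values[offsets[k + j]:offsets[k + j + 1]]
--                        for j in range(len(lc))])
--         k += len(lc)
--     return result
-- ===== Notes on version B (the rewrite author's own statement) =====
-- stated objective: alternative
-- what changed: B replaces A's single index-advancing nested loop by two passes: it first flattens counts and builds a prefix-sum offset table, then slices values between consecutive offsets while grouping by the outer shape.
import Mathlib
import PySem

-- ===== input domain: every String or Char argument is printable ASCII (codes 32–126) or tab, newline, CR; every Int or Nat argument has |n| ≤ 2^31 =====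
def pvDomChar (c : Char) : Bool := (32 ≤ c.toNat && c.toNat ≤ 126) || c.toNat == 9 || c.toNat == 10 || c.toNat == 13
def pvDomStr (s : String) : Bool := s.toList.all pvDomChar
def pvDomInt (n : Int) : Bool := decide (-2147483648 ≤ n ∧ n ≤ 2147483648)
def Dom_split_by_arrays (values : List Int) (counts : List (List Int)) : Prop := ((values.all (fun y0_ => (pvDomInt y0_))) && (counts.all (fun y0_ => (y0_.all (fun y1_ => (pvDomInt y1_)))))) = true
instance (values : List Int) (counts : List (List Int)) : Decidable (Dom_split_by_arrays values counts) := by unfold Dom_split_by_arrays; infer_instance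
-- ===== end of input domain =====

-- ===== PORT A =====
-- A: one pass with a running index i, slicing values[i:i+count] for each count.
def split_by_arrays (values : List Int) (counts : List (List Int)) : List (List (List Int)) :=
  (counts.foldl
    (fun (st : List (List (List Int)) × Int) local_counts =>
      let inner := local_counts.foldl
        (fun (a : List (List Int) × Int) count =>
          (a.1 ++ [PySem.List.slice values (some a.2) (some (a.2 + count))], a.2 + count))
        ([], st.2)
      (st.1 ++ [inner.1], inner.2))
    ([], 0)).1

-- ===== PORT B =====
-- B pass 1: flatten counts and build the prefix-sum offset table.
def pvOffsets (flat : List Int) : List Int :=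
  (flat.foldl (fun (p : List Int × Int) c => (p.1 ++ [p.2 + c], p.2 + c)) ([0], 0)).1

-- B pass 2: slice between consecutive offsets, grouped by the outer shape.
def split_by_arrays_alt (values : List Int) (counts : List (List Int)) : List (List (List Int)) :=
  let flat := counts.flatMap id
  let offsets := pvOffsets flat
  (counts.foldl
    (fun (st : List (List (List Int)) × Nat) lc =>
      (st.1 ++ [(List.range lc.length).map (fun j =>
          PySem.List.slice values (some (offsets.getD (st.2 + j) 0))
            (some (offsets.getD (st.2 + j + 1) 0)))],
       st.2 + lc.length))
    ([], 0)).1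

-- ===== PRECONDITION & SPEC =====
def Spec_split_by_arrays (values : List Int) (counts : List (List Int)) (out : List (List (List Int))) : Prop := out = split_by_arrays_alt values counts
instance (values : List Int) (counts : List (List Int)) (out : List (List (List Int))) : Decidable (Spec_split_by_arrays values counts out) := by unfold Spec_split_by_arrays; infer_instance

-- ===== CLAIM (what is proved, stated in full; the proofs are below) =====
def Claim_equal_split_by_arrays : Prop := ∀ (values : List Int) (counts : List (List Int)), Dom_split_by_arrays values counts → Spec_split_by_arrays values counts (split_by_arrays values counts)

-- ===== LEMMAS AND PROOFS =====

-- reference nested-recursive form both ports are reduced to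
def pvInner (values : List Int) (i : Int) : List Int → List (List Int)
  | [] => []
  | c :: cs => PySem.List.slice values (some i) (some (i + c)) :: pvInner values (i + c) cs

def pvOuter (values : List Int) (i : Int) : List (List Int) → List (List (List Int))
  | [] => []
  | lc :: rest => pvInner values i lc :: pvOuter values (i + lc.sum) rest

theorem A_inner (values : List Int) :
    ∀ (lc : List Int) (acc : List (List Int)) (i : Int),
      lc.foldl (fun (a : List (List Int) × Int) count =>
          (a.1 ++ [PySem.List.slice values (some a.2) (some (a.2 + count))], a.2 + count))
        (acc, i) = (acc ++ pvInner values i lc, i + lc.sum) := by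
  intro lc
  induction lc with
  | nil => intro acc i; simp [pvInner]
  | cons c cs ih =>
      intro acc i
      simp [pvInner, List.foldl_cons, ih, add_assoc]

theorem A_outer (values : List Int) :
    ∀ (counts : List (List Int)) (acc : List (List (List Int))) (i : Int),
      counts.foldl
        (fun (st : List (List (List Int)) × Int) local_counts =>
          let inner := local_counts.foldl
            (fun (a : List (List Int) × Int) count =>
              (a.1 ++ [PySem.List.slice values (some a.2) (some (a.2 + count))], a.2 + count))
            ([], st.2)
          (st.1 ++ [inner.1], inner.2))
        (acc, i) = (acc ++ pvOuter values i counts, i + (counts.map List.sum).sum) := by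
  intro counts
  induction counts with
  | nil => intro acc i; simp [pvOuter]
  | cons lc rest ih =>
      intro acc i
      rw [List.foldl_cons]
      show List.foldl _ ((acc, i).1 ++ [(lc.foldl _ ([], (acc, i).2)).1], (lc.foldl _ ([], (acc, i).2)).2) rest = _
      rw [A_inner, ih]
      simp [pvOuter, add_assoc]

theorem A_eq_outer (values : List Int) (counts : List (List Int)) :
    split_by_arrays values counts = pvOuter values 0 counts := by
  simp [split_by_arrays, A_outer]

theorem scanl_head (l : List Int) (t : Int) :
    List.scanl (· + ·) t l = t :: (List.scanl (· + ·) t l).tail := by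
  cases l <;> simp [List.scanl_cons, List.scanl_nil]

theorem offsets_fold (flat : List Int) :
    ∀ (acc : List Int) (t : Int),
      (flat.foldl (fun (p : List Int × Int) c => (p.1 ++ [p.2 + c], p.2 + c)) (acc, t)).1
        = acc ++ (List.scanl (· + ·) t flat).tail := by
  induction flat with
  | nil => intro acc t; simp [List.scanl_nil]
  | cons c cs ih =>
      intro acc t
      rw [List.foldl_cons, ih, List.scanl_cons]
      rw [scanl_head cs (t + c)]
      simp

theorem pvOffsets_eq_scanl (flat : List Int) :
    pvOffsets flat = List.scanl (· + ·) 0 flat := by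
  rw [pvOffsets, offsets_fold, scanl_head flat 0]
  simp

theorem scanl_getD (flat : List Int) :
    ∀ (t : Int) (k : Nat), k ≤ flat.length →
      (List.scanl (· + ·) t flat).getD k 0 = t + (flat.take k).sum := by
  induction flat with
  | nil =>
      intro t k hk
      have : k = 0 := Nat.le_zero.mp hk
      subst this
      simp [List.scanl_nil]
  | cons c cs ih =>
      intro t k hk
      cases k with
      | zero => simp [List.scanl_cons]
      | succ k' =>
          rw [List.scanl_cons]
          simp only [List.getD_cons_succ, List.take_succ_cons, List.sum_cons]
          rw [ih (t + c) k' (by simpa using hk)]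
          ring

theorem offsets_getD (flat : List Int) (k : Nat) (hk : k ≤ flat.length) :
    (pvOffsets flat).getD k 0 = (flat.take k).sum := by
  rw [pvOffsets_eq_scanl, scanl_getD flat 0 k hk]; ring

theorem pvInner_eq_map (values : List Int) :
    ∀ (lc : List Int) (i : Int),
      pvInner values i lc = (List.range lc.length).map (fun j =>
        PySem.List.slice values (some (i + (lc.take j).sum)) (some (i + (lc.take (j + 1)).sum))) := by
  intro lc
  induction lc with
  | nil => intro i; simp [pvInner]
  | cons c cs ih =>
      intro i
      have h : List.range (c :: cs).length = 0 :: (List.range cs.length).map Nat.succ := by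
        simp [List.length_cons, List.range_succ_eq_map]
      rw [h]
      simp only [pvInner, List.map_cons, List.map_map, ih (i + c)]
      refine List.cons_eq_cons.mpr ⟨by simp, ?_⟩
      apply List.map_congr_left
      intro j _
      simp [Function.comp, add_assoc]

-- the j-th slice in B's group for lc (at flat position k) equals the reference slice
theorem group_eq (values : List Int) (pre lc suf : List Int) :
    (List.range lc.length).map (fun j =>
        PySem.List.slice values (some ((pvOffsets (pre ++ lc ++ suf)).getD (pre.length + j) 0))
          (some ((pvOffsets (pre ++ lc ++ suf)).getD (pre.length + j + 1) 0)))
      = pvInner values pre.sum lc := by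
  rw [pvInner_eq_map]
  apply List.map_congr_left
  intro j hj
  have hj' : j < lc.length := List.mem_range.mp hj
  have h1 : pre.length + j ≤ (pre ++ lc ++ suf).length := by
    simp [List.length_append]; omega
  have h2 : pre.length + j + 1 ≤ (pre ++ lc ++ suf).length := by
    simp [List.length_append]; omega
  rw [offsets_getD _ _ h1, offsets_getD _ _ h2]
  have t1 : ((pre ++ lc ++ suf).take (pre.length + j)) = pre ++ lc.take j := by
    rw [List.append_assoc, List.take_append, List.take_append]
    simp [Nat.sub_eq_zero_of_le (Nat.le_of_lt hj')]
  have t2 : ((pre ++ lc ++ suf).take (pre.length + j + 1)) = pre ++ lc.take (j + 1) := by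
    rw [List.append_assoc, List.take_append, List.take_append]
    have : pre.length + j + 1 - pre.length = j + 1 := by omega
    simp [this, Nat.sub_eq_zero_of_le hj']
    omega
  rw [t1, t2]
  simp

theorem B_fold (values : List Int) (counts : List (List Int)) :
    ∀ (rest pre : List (List Int)) (acc : List (List (List Int))),
      counts = pre ++ rest →
      (rest.foldl
        (fun (st : List (List (List Int)) × Nat) lc =>
          (st.1 ++ [(List.range lc.length).map (fun j =>
              PySem.List.slice values (some ((pvOffsets (counts.flatMap id)).getD (st.2 + j) 0))
                (some ((pvOffsets (counts.flatMap id)).getD (st.2 + j + 1) 0)))],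
           st.2 + lc.length))
        (acc, (pre.flatMap id).length)).1
        = acc ++ pvOuter values (pre.flatMap id).sum rest := by
  intro rest
  induction rest with
  | nil => intro pre acc _; simp [pvOuter]
  | cons lc rest' ih =>
      intro pre acc hsplit
      have hflat : counts.flatMap id = (pre.flatMap id) ++ lc ++ (rest'.flatMap id) := by
        subst hsplit; simp [List.flatMap_append]
      have hgroup : (List.range lc.length).map (fun j =>
          PySem.List.slice values
            (some ((pvOffsets (counts.flatMap id)).getD ((pre.flatMap id).length + j) 0))
            (some ((pvOffsets (counts.flatMap id)).getD ((pre.flatMap id).length + j + 1) 0)))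
          = pvInner values (pre.flatMap id).sum lc := by
        rw [hflat]; exact group_eq values (pre.flatMap id) lc (rest'.flatMap id)
      simp only [List.foldl_cons]
      have hlen : (pre.flatMap id).length + lc.length = ((pre ++ [lc]).flatMap id).length := by
        simp [List.flatMap_append]
      have hsum : (pre.flatMap id).sum + lc.sum = ((pre ++ [lc]).flatMap id).sum := by
        simp [List.flatMap_append]
      rw [hgroup, hlen, ih (pre ++ [lc]) (acc ++ [pvInner values (pre.flatMap id).sum lc])
        (by simp [hsplit])]
      simp [pvOuter]

theorem B_eq_outer (values : List Int) (counts : List (List Int)) :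
    split_by_arrays_alt values counts = pvOuter values 0 counts := by
  have h := B_fold values counts counts [] [] (by simp)
  simpa [split_by_arrays_alt] using h

-- ===== VERDICT (by name: the statement is the Claim_ definition above) =====
theorem split_by_arrays_spec : Claim_equal_split_by_arrays := by
  intro values counts _
  unfold Spec_split_by_arrays
  rw [A_eq_outer, B_eq_outer]
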